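-- pv_equiv track=rewrite | github.com/alleff-pucrs/ferramenta_dados | analise_moodle.py | arquivo_metricas
-- ===== SOURCE A (Python) =====
-- def arquivo_metricas(data):
--     '''Função que cria o arquivo de métricas do moodle'''
--     metricas_copy = {
--         "Total":0,
--         "Concluintes":0,
--         "Incompletos":0,
--         "Nao_iniciados":0
--     }
--
--     metricas = {"metricas": metricas_copy}
--
--     for row in data[1:]:
--         metricas["metricas"]["Total"] += 1
--         last_module = len(row) - 1
--
--         status = row[last_module]
--         if status == "Complete":
--             metricas["metricas"]["Concluintes"] += 1
--         elif status == "Incomplete":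
--             metricas["metricas"]["Incompletos"] += 1
--
--         if "*" in row[0]:
--             metricas["metricas"]["Nao_iniciados"] += 1
--
--     return metricas
-- ===== SOURCE B (Python) =====
-- def arquivo_metricas(data):
--     '''Função que cria o arquivo de métricas do moodle'''
--     rows = data[1:]
--     return {
--         "metricas": {
--             "Total": len(rows),
--             "Concluintes": sum(1 for r in rows if r[len(r) - 1] == "Complete"),
--             "Incompletos": sum(1 for r in rows if r[len(r) - 1] == "Incomplete"),
--             "Nao_iniciados": sum(1 for r in rows if "*" in r[0]),
--         }
--     }
-- ===== Notes on version B (the rewrite author's own statement) =====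
-- stated objective: simpler
-- what changed: Replaces the single interleaved pass maintaining four running counters in a nested mutable dict with independent len/sum-over-filter tallies computed directly when building the result dict.
import Mathlib
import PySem

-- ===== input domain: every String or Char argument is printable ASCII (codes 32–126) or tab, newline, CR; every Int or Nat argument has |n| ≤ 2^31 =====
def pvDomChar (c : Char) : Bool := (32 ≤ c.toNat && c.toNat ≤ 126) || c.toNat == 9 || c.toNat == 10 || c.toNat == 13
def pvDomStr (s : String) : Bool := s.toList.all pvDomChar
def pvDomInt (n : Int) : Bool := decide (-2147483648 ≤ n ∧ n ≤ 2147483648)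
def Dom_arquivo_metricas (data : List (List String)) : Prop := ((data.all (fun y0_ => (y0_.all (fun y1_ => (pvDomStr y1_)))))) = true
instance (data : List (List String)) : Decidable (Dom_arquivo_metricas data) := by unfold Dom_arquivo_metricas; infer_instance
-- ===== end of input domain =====

-- B drops A's interleaved running-counter pass over a nested mutable dict and instead
-- computes each of the four tallies independently (len / count-if) while building the result.

-- ===== PORT A =====
-- one fold over data[1:] carrying the four counters (Total, Concluintes, Incompletos, Nao_iniciados)
def pvStepA (st : Int × Int × Int × Int) (row : List String) : Int × Int × Int × Int :=
  let t := st.1 + 1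
  let lastModule : Int := (row.length : Int) - 1
  let status := (PySem.List.pyGet? row lastModule).getD ""   -- row[last_module]; none (empty row) excluded by Pre_
  let c := if status = "Complete" then st.2.1 + 1 else st.2.1
  let i := if status = "Complete" then st.2.2.1
           else if status = "Incomplete" then st.2.2.1 + 1 else st.2.2.1
  let first := (PySem.List.pyGet? row 0).getD ""             -- row[0]; none (empty row) excluded by Pre_
  let n := if PySem.Str.isIn "*" first then st.2.2.2 + 1 else st.2.2.2
  (t, c, i, n)

def arquivo_metricas (data : List (List String)) : List (String × List (String × Int)) :=
  let st := (data.drop 1).foldl pvStepA (0, 0, 0, 0)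
  [("metricas", [("Total", st.1), ("Concluintes", st.2.1),
                 ("Incompletos", st.2.2.1), ("Nao_iniciados", st.2.2.2)])]

-- ===== PORT B =====
def pvIsComplete (r : List String) : Bool :=
  (PySem.List.pyGet? r ((r.length : Int) - 1)).getD "" = "Complete"

def pvIsIncomplete (r : List String) : Bool :=
  (PySem.List.pyGet? r ((r.length : Int) - 1)).getD "" = "Incomplete"

def pvHasStar (r : List String) : Bool :=
  PySem.Str.isIn "*" ((PySem.List.pyGet? r 0).getD "")

def arquivo_metricas_alt (data : List (List String)) : List (String × List (String × Int)) :=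
  let rows := data.drop 1
  [("metricas",
    [("Total", (rows.length : Int)),
     ("Concluintes", (rows.countP pvIsComplete : Int)),
     ("Incompletos", (rows.countP pvIsIncomplete : Int)),
     ("Nao_iniciados", (rows.countP pvHasStar : Int))])]

-- ===== PRECONDITION & SPEC =====
-- Pre_ excludes only inputs where Python A (and B) raise IndexError: an empty row among data[1:].
def Pre_arquivo_metricas (data : List (List String)) : Prop :=
  ∀ r ∈ data.drop 1, r ≠ []
instance (data : List (List String)) : Decidable (Pre_arquivo_metricas data) := by
  unfold Pre_arquivo_metricas; infer_instance

def pvWitness_arquivo_metricas : List (List String) :=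
  [["header"], ["ana", "Complete"], ["*bob", "Incomplete"]]

def Spec_arquivo_metricas (data : List (List String)) (out : List (String × List (String × Int))) : Prop := out = arquivo_metricas_alt data
instance (data : List (List String)) (out : List (String × List (String × Int))) : Decidable (Spec_arquivo_metricas data out) := by unfold Spec_arquivo_metricas; infer_instance

-- ===== CLAIM (what is proved, stated in full; the proofs are below) =====
def Claim_equal_arquivo_metricas : Prop := ∀ (data : List (List String)), Dom_arquivo_metricas data → Pre_arquivo_metricas data → Spec_arquivo_metricas data (arquivo_metricas data)

-- ===== LEMMAS AND PROOFS =====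
lemma pvFoldA (rows : List (List String)) (t c i n : Int) :
    rows.foldl pvStepA (t, c, i, n) =
      (t + rows.length, c + rows.countP pvIsComplete,
       i + rows.countP pvIsIncomplete, n + rows.countP pvHasStar) := by
  induction rows generalizing t c i n with
  | nil => simp
  | cons r rs ih =>
      simp only [List.foldl_cons, List.countP_cons, pvStepA, ih,
                 pvIsComplete, pvIsIncomplete, pvHasStar]
      by_cases hc : ((PySem.List.pyGet? r ((r.length : Int) - 1)).getD "" = "Complete") <;>
        by_cases hi : ((PySem.List.pyGet? r ((r.length : Int) - 1)).getD "" = "Incomplete") <;>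
          by_cases hs : (PySem.Chars.isIn ['*'] ((PySem.List.pyGet? r 0).getD "").toList = true) <;>
            (simp [hc, hi, hs]; try (push_cast; ring); try tauto)

-- ===== VERDICT (by name: the statement is the Claim_ definition above) =====
theorem arquivo_metricas_spec : Claim_equal_arquivo_metricas := by
  intro data _ _
  unfold Spec_arquivo_metricas arquivo_metricas arquivo_metricas_alt
  simp [pvFoldA]
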